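-- pv_equiv track=rewrite | github.com/ankle-stubber/obfuscate | obfuscator/obfuscator/transformers.py | _detect_json_indent
-- ===== SOURCE A (Python) =====
-- from typing import Dict, Any, List, Union, Optional
--
-- def _detect_json_indent(json_str: str) -> Optional[int]:
--     """
--     Detect indentation in a JSON string.
--
--     Args:
--         json_str: JSON string to analyze
--
--     Returns:
--         Detected indentation level
--     """
--     # Default to 2 spaces if indentation can't be detected
--     indent = 2
--
--     lines = json_str.split("\n")
--     if len(lines) > 1:
--         for line in lines[1:]:  # Skip first line
--             if line.strip() and line.startswith(" "):
--                 # Count leading spaces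
--                 indent = len(line) - len(line.lstrip(" "))
--                 break
--
--     return indent
-- ===== SOURCE B (Python) =====
-- from typing import Optional
--
-- def _detect_json_indent(json_str: str) -> Optional[int]:
--     """Detect indentation width: single forward character scan (state machine),
--     no line splitting or per-line strip/lstrip passes."""
--     SKIP, NL, SP, CHK = 0, 1, 2, 3  # skip rest of line / at line start / counting leading spaces / seeking non-whitespace
--     state = SKIP  # the first line is never considered
--     spaces = 0
--     for ch in json_str:
--         if ch == "\n":
--             state = NL
--         elif state == NL:
--             if ch == " ":
--                 state = SP
--                 spaces = 1
--             else:
--                 state = SKIP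
--         elif state == SP:
--             if ch == " ":
--                 spaces += 1
--             elif ch.isspace():
--                 state = CHK  # line may still be blank; freeze the count
--             else:
--                 return spaces
--         elif state == CHK:
--             if not ch.isspace():
--                 return spaces
--     return 2
-- ===== Notes on version B (the rewrite author's own statement) =====
-- stated objective: alternative
-- what changed: Replaced split("\n") plus per-line strip()/lstrip(" ") passes with a single forward character-level state machine that never materialises lines and returns as soon as the first indented non-blank line is confirmed.
import Mathlib
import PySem

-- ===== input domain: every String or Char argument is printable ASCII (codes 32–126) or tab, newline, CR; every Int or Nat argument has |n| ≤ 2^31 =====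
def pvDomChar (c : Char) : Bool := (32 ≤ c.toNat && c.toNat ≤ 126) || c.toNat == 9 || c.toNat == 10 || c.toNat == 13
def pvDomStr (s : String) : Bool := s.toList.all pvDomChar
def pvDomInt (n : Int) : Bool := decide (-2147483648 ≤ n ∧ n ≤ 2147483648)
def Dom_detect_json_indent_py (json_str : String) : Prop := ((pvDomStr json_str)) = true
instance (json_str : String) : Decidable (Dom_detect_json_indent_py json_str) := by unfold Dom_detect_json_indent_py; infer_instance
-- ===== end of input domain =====

-- B replaces A's split-into-lines + per-line strip/lstrip scanning with a single
-- forward character-level state machine (objective: alternative; same O(n) cost).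

-- ===== PORT A =====
-- exact hand port of `line.lstrip(" ")` (PySem has no lstrip-with-chars argument):
-- drop the leading run of ' ' characters, exactly what CPython does for lstrip(" ").
def pyLstripSpace (l : List Char) : List Char := l.dropWhile (fun c => c == ' ')

-- A's `for line in lines[1:]` with break: structural recursion returning the final `indent`.
def aLoop : List (List Char) → Int
  | [] => 2
  | line :: rest =>
    if (!(PySem.Chars.strip line).isEmpty) && PySem.Chars.startswith line [' '] then
      (line.length : Int) - ((pyLstripSpace line).length : Int)
    else aLoop rest

def detect_json_indent_py (json_str : String) : Option Int :=
  let indent : Int := 2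
  let lines := PySem.Chars.splitOn json_str.toList ['\n']
  some (if 1 < lines.length then aLoop (PySem.List.slice lines (some 1) none) else indent)

-- ===== PORT B =====
-- Source B's for-loop with early return; state: 0 = SKIP, 1 = NL, 2 = SP, 3 = CHK.
def altLoop : List Char → Int → Int → Int
  | [], _, _ => 2
  | ch :: cs, state, spaces =>
    if ch == '\n' then altLoop cs 1 spaces
    else if state == 1 then
      if ch == ' ' then altLoop cs 2 1 else altLoop cs 0 spaces
    else if state == 2 then
      if ch == ' ' then altLoop cs 2 (spaces + 1)
      else if PySem.Chars.isspace ch then altLoop cs 3 spaces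
      else spaces
    else if state == 3 then
      if !PySem.Chars.isspace ch then spaces else altLoop cs 3 spaces
    else altLoop cs state spaces

def detect_json_indent_py_alt (json_str : String) : Option Int :=
  some (altLoop json_str.toList 0 0)

-- ===== PRECONDITION & SPEC =====
def Spec_detect_json_indent_py (json_str : String) (out : Option Int) : Prop := out = detect_json_indent_py_alt json_str
instance (json_str : String) (out : Option Int) : Decidable (Spec_detect_json_indent_py json_str out) := by unfold Spec_detect_json_indent_py; infer_instance

-- ===== CLAIM (what is proved, stated in full; the proofs are below) =====
def Claim_equal_detect_json_indent_py : Prop := ∀ (json_str : String), Dom_detect_json_indent_py json_str → Spec_detect_json_indent_py json_str (detect_json_indent_py json_str)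

-- ===== LEMMAS AND PROOFS =====

theorem go_single (fuel : Nat) : ∀ (l cur : List Char) (acc : List (List Char)) (_ : l.length ≤ fuel),
    PySem.Chars.splitOn.go ['\n'] fuel l cur acc
      = acc.reverse ++ (List.splitOnP (fun c => c == '\n') l).modifyHead (fun x => cur.reverse ++ x) := by
  induction fuel with
  | zero =>
    intro l cur acc h
    have hl : l = [] := by cases l <;> simp_all
    subst hl
    simp [PySem.Chars.splitOn.go, List.splitOnP_nil]
  | succ fuel ih =>
    intro l cur acc h
    cases l with
    | nil => simp [PySem.Chars.splitOn.go, List.splitOnP_nil]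
    | cons c rest =>
      by_cases hc : c = '\n'
      · subst hc
        rw [PySem.Chars.splitOn.go]
        simp only [show (['\n'].isPrefixOf ('\n' :: rest)) = true from by simp [List.isPrefixOf],
          if_true]
        rw [ih _ [] _ (by simpa using h)]
        simp only [List.splitOnP_cons, if_pos (by decide : ('\n' == '\n') = true),
          List.reverse_cons, List.reverse_nil, List.nil_append, List.modifyHead]
        cases h' : List.splitOnP (fun c => c == '\n') rest <;> simp [h']
      · have hb : (['\n'].isPrefixOf (c :: rest)) = false := by
          simp [List.isPrefixOf]; exact fun h' => absurd h'.symm hc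
        rw [PySem.Chars.splitOn.go]
        rw [if_neg (by simp [hb])]
        rw [ih _ _ _ (by simpa using Nat.le_of_succ_le_succ h)]
        have hp : (c == '\n') = false := by simpa using hc
        simp only [List.splitOnP_cons, hp, Bool.false_eq_true, if_false,
          List.modifyHead_modifyHead]
        have hfg : (fun x => (c :: cur).reverse ++ x) = ((fun x => cur.reverse ++ x) ∘ List.cons c) := by
          funext x; simp
        rw [hfg]

theorem splitOn_newline (s : List Char) :
    PySem.Chars.splitOn s ['\n'] = List.splitOnP (fun c => c == '\n') s := by
  rw [PySem.Chars.splitOn, go_single _ _ _ _ (by omega)]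
  simp
  cases h' : List.splitOnP (fun c => c == '\n') s <;> simp [List.modifyHead, h']

def curLine (cs : List Char) : List Char := cs.takeWhile (fun c => c != '\n')

def NW (l : List Char) : Bool := l.any (fun c => !PySem.Chars.isspace c)

def leadSp (cs : List Char) : Nat := (cs.takeWhile (fun c => c == ' ')).length

theorem strip_isEmpty (l : List Char) : (PySem.Chars.strip l).isEmpty = !NW l := by
  have h1 : (PySem.Chars.strip l) = [] ↔ (∀ x ∈ l, PySem.Chars.isspace x = true) := by
    unfold PySem.Chars.strip PySem.Chars.rstrip PySem.Chars.lstrip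
    rw [List.reverse_eq_nil_iff, List.dropWhile_eq_nil_iff]
    constructor
    · intro h x hx
      by_cases hs : PySem.Chars.isspace x = true
      · exact hs
      · exfalso
        have hx' : x ∈ List.dropWhile PySem.Chars.isspace l := by
          have := (List.takeWhile_append_dropWhile (p := PySem.Chars.isspace) (l := l))
          rw [← this] at hx
          rcases List.mem_append.mp hx with h' | h'
          · exact absurd (List.mem_takeWhile_imp h') hs
          · exact h'
        exact hs (h x (List.mem_reverse.mpr hx'))
    · intro h x hx
      exact h x ((List.dropWhile_sublist _).mem (List.mem_reverse.mp hx))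
  cases hnw : NW l
  · simp only [NW, List.any_eq_false] at hnw
    simp only [Bool.not_false, List.isEmpty_iff]
    exact h1.mpr (fun x hx => by simpa using hnw x hx)
  · simp only [NW, List.any_eq_true] at hnw
    obtain ⟨x, hx, hxs⟩ := hnw

    simp only [Bool.not_true, List.isEmpty_eq_false_iff, ne_eq]
    intro hnil
    exact absurd (h1.mp hnil x hx) (by simpa using hxs)

theorem lines_eq (cs : List Char) :
    List.splitOnP (fun c => c == '\n') cs
      = curLine cs :: (List.splitOnP (fun c => c == '\n') cs).tail := by
  induction cs with
  | nil => simp [curLine]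
  | cons c cs ih =>
    by_cases hc : c = '\n'
    · subst hc; simp [List.splitOnP_cons, curLine]
    · have hp : (c == '\n') = false := by simpa using hc
      rw [List.splitOnP_cons]
      simp only [hp, Bool.false_eq_true, if_false]
      rw [ih]
      simp only [List.modifyHead, curLine, List.takeWhile_cons]
      have hne : (c != '\n') = true := by simpa using hc
      simp [hne]

theorem leadSp_cons_space (cs : List Char) : leadSp (' ' :: cs) = 1 + leadSp cs := by
  simp [leadSp, List.takeWhile_cons]; omega

theorem leadSp_cons_other (c : Char) (cs : List Char) (h : (c == ' ') = false) :
    leadSp (c :: cs) = 0 := by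
  simp [leadSp, List.takeWhile_cons, h]

theorem leadSp_curLine (cs : List Char) : leadSp (curLine cs) = leadSp cs := by
  induction cs with
  | nil => rfl
  | cons c cs ih =>
    by_cases hc : c = '\n'
    · subst hc; simp [curLine, leadSp, List.takeWhile_cons]
    · have hne : (c != '\n') = true := by simpa using hc
      by_cases hs : c = ' '
      · subst hs
        simp only [curLine, List.takeWhile_cons, hne, if_true] at *
        rw [leadSp_cons_space, leadSp_cons_space, ih]
      · have hs' : (c == ' ') = false := by simpa using hs
        simp only [curLine, List.takeWhile_cons, hne, if_true]
        rw [leadSp_cons_other _ _ hs', leadSp_cons_other _ _ hs']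

theorem aLoop_value (l : List Char) :
    (l.length : Int) - ((pyLstripSpace l).length : Int) = (leadSp l : Int) := by
  have := congrArg List.length (List.takeWhile_append_dropWhile (p := fun c => c == ' ') (l := l))
  simp only [List.length_append] at this
  simp only [pyLstripSpace, leadSp]
  omega

theorem NW_cons (c : Char) (l : List Char) :
    NW (c :: l) = (!PySem.Chars.isspace c || NW l) := by
  simp [NW]

theorem lines_cons_ne (c : Char) (cs : List Char) (hp : (c == '\n') = false) :
    List.splitOnP (fun c => c == '\n') (c :: cs)
      = (c :: curLine cs) :: (List.splitOnP (fun c => c == '\n') cs).tail := by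
  rw [List.splitOnP_cons]
  simp only [hp, Bool.false_eq_true, if_false]
  rw [lines_eq cs]
  simp [List.modifyHead]

theorem aLoop_cons_space (l : List Char) (T : List (List Char)) :
    aLoop ((' ' :: l) :: T)
      = if NW l then ((1 : Int) + (leadSp l : Int)) else aLoop T := by
  rw [aLoop]
  have hsw : PySem.Chars.startswith (' ' :: l) [' '] = true := by
    simp [PySem.Chars.startswith, List.isPrefixOf]
  rw [strip_isEmpty, hsw, NW_cons]
  have hsp : PySem.Chars.isspace ' ' = true := by decide
  rw [hsp]
  simp only [Bool.not_true, Bool.false_or, Bool.not_not, Bool.and_true]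
  cases hnw : NW l
  · simp
  · have hv : ((' ' :: l).length : Int) - ((pyLstripSpace (' ' :: l)).length : Int)
        = (leadSp (' ' :: l) : Int) := aLoop_value _
    rw [leadSp_cons_space] at hv
    simp only [if_true]
    rw [hv]
    push_cast
    ring

theorem aLoop_cons_other (c : Char) (l : List Char) (T : List (List Char))
    (h : (c == ' ') = false) :
    aLoop ((c :: l) :: T) = aLoop T := by
  rw [aLoop]
  have hsw : PySem.Chars.startswith (c :: l) [' '] = false := by
    simp [PySem.Chars.startswith, List.isPrefixOf, Bool.and_eq_false_iff]
    intro h'; exact absurd h'.symm (by simpa using h)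
  rw [hsw]
  simp

theorem curLine_cons_ne (c : Char) (cs : List Char) (hp : (c == '\n') = false) :
    curLine (c :: cs) = c :: curLine cs := by
  have h : (c != '\n') = true := by simp [bne]; simpa using hp
  simp [curLine, List.takeWhile_cons, h]

theorem aLoop_cons_nil (T : List (List Char)) : aLoop ([] :: T) = aLoop T := by
  rw [aLoop]
  simp [PySem.Chars.startswith, List.isPrefixOf]

theorem master (cs : List Char) : ∀ k : Int,
    altLoop cs 0 k = aLoop (List.splitOnP (fun c => c == '\n') cs).tail ∧
    altLoop cs 1 k = aLoop (List.splitOnP (fun c => c == '\n') cs) ∧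
    altLoop cs 2 k = (if NW (curLine cs) then k + (leadSp cs : Int)
      else aLoop (List.splitOnP (fun c => c == '\n') cs).tail) ∧
    altLoop cs 3 k = (if NW (curLine cs) then k
      else aLoop (List.splitOnP (fun c => c == '\n') cs).tail) := by
  induction cs with
  | nil =>
    intro k
    refine ⟨rfl, ?_, ?_, ?_⟩
    · simp [List.splitOnP_nil, aLoop_cons_nil]; rfl
    · simp [curLine, NW, List.splitOnP_nil, aLoop_cons_nil]; rfl
    · simp [curLine, NW, List.splitOnP_nil, aLoop_cons_nil]; rfl
  | cons c cs ih =>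
    intro k
    by_cases hc : c = '\n'
    · subst hc
      have hL : List.splitOnP (fun c => c == '\n') ('\n' :: cs)
          = [] :: List.splitOnP (fun c => c == '\n') cs := by
        rw [List.splitOnP_cons]; simp
      have hcl : curLine ('\n' :: cs) = [] := by simp [curLine, List.takeWhile_cons]
      have hNW : NW (curLine ('\n' :: cs)) = false := by rw [hcl]; rfl
      refine ⟨?_, ?_, ?_, ?_⟩ <;>
        simp only [altLoop, beq_self_eq_true, if_true, hL, hNW, hcl,
          List.tail_cons, aLoop_cons_nil, Bool.false_eq_true, if_false]
      · exact (ih k).2.1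
      · exact (ih k).2.1
      · exact (ih k).2.1
      · exact (ih k).2.1
    · have hp : (c == '\n') = false := by simpa using hc
      have hL := lines_cons_ne c cs hp
      have hcl := curLine_cons_ne c cs hp
      by_cases hsc : c = ' '
      · subst hsc
        refine ⟨?_, ?_, ?_, ?_⟩
        · rw [altLoop]
          simp only [show ((' ' : Char) == '\n') = false from by decide, Bool.false_eq_true,
            if_false, show ((0 : Int) == 1) = false from by decide,
            show ((0 : Int) == 2) = false from by decide,
            show ((0 : Int) == 3) = false from by decide]
          rw [(ih k).1, hL, List.tail_cons]
        · rw [altLoop]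
          simp only [show ((' ' : Char) == '\n') = false from by decide, Bool.false_eq_true,
            if_false, show ((1 : Int) == 1) = true from by decide, if_true,
            beq_self_eq_true]
          rw [(ih 1).2.2.1, hL, aLoop_cons_space, leadSp_curLine]
        · rw [altLoop]
          simp only [show ((' ' : Char) == '\n') = false from by decide, Bool.false_eq_true,
            if_false, show ((2 : Int) == 1) = false from by decide,
            show ((2 : Int) == 2) = true from by decide, if_true, beq_self_eq_true]
          rw [(ih (k + 1)).2.2.1, hL, List.tail_cons, hcl, NW_cons,
            show PySem.Chars.isspace ' ' = true from by decide]
          simp only [Bool.not_true, Bool.false_or]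
          rw [leadSp_cons_space]
          cases NW (curLine cs) <;> simp
          ring
        · rw [altLoop]
          simp only [show ((' ' : Char) == '\n') = false from by decide, Bool.false_eq_true,
            if_false, show ((3 : Int) == 1) = false from by decide,
            show ((3 : Int) == 2) = false from by decide,
            show ((3 : Int) == 3) = true from by decide, if_true,
            show (!PySem.Chars.isspace ' ') = false from by decide]
          rw [(ih k).2.2.2, hL, List.tail_cons, hcl, NW_cons,
            show PySem.Chars.isspace ' ' = true from by decide]
          simp
      · have hsc' : (c == ' ') = false := by simpa using hsc
        have hlead : leadSp (c :: cs) = 0 := leadSp_cons_other c cs hsc'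
        by_cases hss : PySem.Chars.isspace c = true
        · refine ⟨?_, ?_, ?_, ?_⟩
          · rw [altLoop]
            simp only [hp, Bool.false_eq_true, if_false,
              show ((0 : Int) == 1) = false from by decide,
              show ((0 : Int) == 2) = false from by decide,
              show ((0 : Int) == 3) = false from by decide]
            rw [(ih k).1, hL, List.tail_cons]
          · rw [altLoop]
            simp only [hp, Bool.false_eq_true, if_false,
              show ((1 : Int) == 1) = true from by decide, if_true, hsc']
            rw [(ih k).1, hL, aLoop_cons_other c _ _ hsc']
          · rw [altLoop]
            simp only [hp, Bool.false_eq_true, if_false, hsc',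
              show ((2 : Int) == 1) = false from by decide,
              show ((2 : Int) == 2) = true from by decide, if_true, hss]
            rw [(ih k).2.2.2, hL, List.tail_cons, hcl, NW_cons, hss, hlead]
            simp
          · rw [altLoop]
            simp only [hp, Bool.false_eq_true, if_false,
              show ((3 : Int) == 1) = false from by decide,
              show ((3 : Int) == 2) = false from by decide,
              show ((3 : Int) == 3) = true from by decide, if_true, hss,
              Bool.not_true]
            rw [(ih k).2.2.2, hL, List.tail_cons, hcl, NW_cons, hss]
            simp
        · have hss' : PySem.Chars.isspace c = false := by simpa using hss
          have hNW : NW (c :: curLine cs) = true := by rw [NW_cons, hss']; simp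
          refine ⟨?_, ?_, ?_, ?_⟩
          · rw [altLoop]
            simp only [hp, Bool.false_eq_true, if_false,
              show ((0 : Int) == 1) = false from by decide,
              show ((0 : Int) == 2) = false from by decide,
              show ((0 : Int) == 3) = false from by decide]
            rw [(ih k).1, hL, List.tail_cons]
          · rw [altLoop]
            simp only [hp, Bool.false_eq_true, if_false,
              show ((1 : Int) == 1) = true from by decide, if_true, hsc']
            rw [(ih k).1, hL, aLoop_cons_other c _ _ hsc']
          · rw [altLoop]
            simp only [hp, Bool.false_eq_true, if_false, hsc',
              show ((2 : Int) == 1) = false from by decide,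
              show ((2 : Int) == 2) = true from by decide, if_true, hss']
            rw [hcl, hNW, hlead]
            simp
          · rw [altLoop]
            simp only [hp, Bool.false_eq_true, if_false,
              show ((3 : Int) == 1) = false from by decide,
              show ((3 : Int) == 2) = false from by decide,
              show ((3 : Int) == 3) = true from by decide, if_true, hss',
              Bool.not_false]
            rw [hcl, hNW]
            simp

theorem final (s : String) : detect_json_indent_py s = detect_json_indent_py_alt s := by
  unfold detect_json_indent_py detect_json_indent_py_alt
  rw [splitOn_newline]
  rw [(master s.toList 0).1]
  rw [lines_eq s.toList]
  have hs : PySem.List.slice (curLine s.toList :: (List.splitOnP (fun c => c == '\n') s.toList).tail)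
      (some 1) none = (List.splitOnP (fun c => c == '\n') s.toList).tail := by
    simp [pysem]
  simp only [hs]
  cases ht : (List.splitOnP (fun c => c == '\n') s.toList).tail with
  | nil => simp [aLoop]
  | cons a t => simp

-- ===== VERDICT (by name: the statement is the Claim_ definition above) =====
theorem detect_json_indent_py_spec : Claim_equal_detect_json_indent_py := by
  intro json_str _
  unfold Spec_detect_json_indent_py
  exact final json_str
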